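-- pv_equiv track=rewrite | github.com/eloitanguy/tarotbot | tarot_commands/game.py | calcul_score_descendante
-- ===== SOURCE A (Python) =====
-- def calcul_score_descendante(descendante_players, descendante_points):
--     players = [p for p in descendante_players.values() if p]
--     n_players = len(players)
--     scores = {p: 0 for p in players}
--     for idx, player in enumerate(players):
--         player_points = descendante_points[idx]
--         scores[player] -= n_players * player_points  # will receive +player_points in the next loop
--         for player2 in players:  # this includes the current player!
--             scores[player2] += player_points
--     return scores
-- ===== SOURCE B (Python) =====
-- def calcul_score_descendante(descendante_players, descendante_points):
--     players = [p for p in descendante_players.values() if p]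
--     n = len(players)
--     total = sum(descendante_points[:n])
--     scores = {}
--     for p, pt in zip(players, descendante_points):
--         scores[p] = scores.get(p, 0) + total - n * pt
--     return scores
-- ===== Notes on version B (the rewrite author's own statement) =====
-- stated objective: faster
-- what changed: Replaces A's quadratic nested loops (broadcasting each player's points to every player's score) with a single pass that adds total - n*points[i] to player i's entry, after summing the first n points once.
import Mathlib
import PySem

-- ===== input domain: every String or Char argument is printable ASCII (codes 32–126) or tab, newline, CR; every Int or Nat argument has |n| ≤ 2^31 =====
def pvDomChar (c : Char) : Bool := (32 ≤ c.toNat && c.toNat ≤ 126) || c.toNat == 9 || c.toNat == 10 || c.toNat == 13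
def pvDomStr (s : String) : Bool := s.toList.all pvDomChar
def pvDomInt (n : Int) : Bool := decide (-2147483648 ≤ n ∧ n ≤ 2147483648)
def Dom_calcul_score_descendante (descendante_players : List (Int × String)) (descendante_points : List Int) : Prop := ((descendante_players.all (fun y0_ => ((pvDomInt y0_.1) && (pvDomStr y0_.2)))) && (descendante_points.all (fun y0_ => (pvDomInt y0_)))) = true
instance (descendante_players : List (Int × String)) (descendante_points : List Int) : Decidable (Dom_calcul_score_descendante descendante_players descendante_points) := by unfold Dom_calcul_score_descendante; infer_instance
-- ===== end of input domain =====

-- B replaces A's quadratic nested accumulation by one pass that adds total - n*points[i] to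
-- each player's score (objective: faster); return value only, neither mutates its arguments.

-- ===== PORT A =====
def calcul_score_descendante (descendante_players : List (Int × String)) (descendante_points : List Int) : List (String × Int) :=
  let players := ((PySem.Dict.ofList descendante_players).values).filter (fun p => !(p == ""))
  let n_players : Int := (players.length : Int)
  let scores0 : PySem.Dict String Int := players.foldl (fun d p => d.insert p 0) PySem.Dict.empty
  let scores := (PySem.List.enumerate players).foldl
    (fun d ip =>
      let player_points := PySem.List.pyGetD descendante_points ip.1 0  -- descendante_points[idx]; Pre_ keeps idx in range
      let d1 := d.modify ip.2 0 (fun v => v - n_players * player_points)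
      players.foldl (fun d2 p2 => d2.modify p2 0 (fun v => v + player_points)) d1)
    scores0
  scores.items

-- ===== PORT B =====
def calcul_score_descendante_alt (descendante_players : List (Int × String)) (descendante_points : List Int) : List (String × Int) :=
  let players := ((PySem.Dict.ofList descendante_players).values).filter (fun p => !(p == ""))
  let n : Int := (players.length : Int)
  let total := (PySem.List.slice descendante_points none (some (players.length : Int))).sum
  ((players.zip descendante_points).foldl
      (fun d pp => d.insert pp.1 (d.getD pp.1 0 + total - n * pp.2))
      (PySem.Dict.empty : PySem.Dict String Int)).items

-- ===== PRECONDITION & SPEC =====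
-- Pre_ excludes exactly the inputs on which A raises IndexError: fewer points than kept
-- (non-empty-named) players.
def Pre_calcul_score_descendante (descendante_players : List (Int × String)) (descendante_points : List Int) : Prop :=
  let players := ((PySem.Dict.ofList descendante_players).values).filter (fun p => !(p == ""))
  players.length ≤ descendante_points.length
instance (descendante_players : List (Int × String)) (descendante_points : List Int) : Decidable (Pre_calcul_score_descendante descendante_players descendante_points) := by unfold Pre_calcul_score_descendante; infer_instance

def pvWitness_calcul_score_descendante : (List (Int × String)) × List Int := ([(1, "ann"), (2, "bob"), (3, "")], [4, -2, 7])

def Spec_calcul_score_descendante (descendante_players : List (Int × String)) (descendante_points : List Int) (out : List (String × Int)) : Prop := out = calcul_score_descendante_alt descendante_players descendante_points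
instance (descendante_players : List (Int × String)) (descendante_points : List Int) (out : List (String × Int)) : Decidable (Spec_calcul_score_descendante descendante_players descendante_points out) := by unfold Spec_calcul_score_descendante; infer_instance

-- ===== CLAIM (what is proved, stated in full; the proofs are below) =====
def Claim_equal_calcul_score_descendante : Prop := ∀ (descendante_players : List (Int × String)) (descendante_points : List Int), Dom_calcul_score_descendante descendante_players descendante_points → Pre_calcul_score_descendante descendante_players descendante_points → Spec_calcul_score_descendante descendante_players descendante_points (calcul_score_descendante descendante_players descendante_points)

-- ===== LEMMAS AND PROOFS =====

-- inserting a key already among the item keys rewrites exactly its value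
lemma pv_items_insert_mem (Q : List String) (g : String → Int) (d : PySem.Dict String Int)
    (hit : d.items = Q.map (fun p => (p, g p))) {q : String} (hq : q ∈ Q) (w : Int) :
    (d.insert q w).items = Q.map (fun p => (p, if p = q then w else g p)) := by
  have hkeys : d.keys = Q := by
    simp [PySem.Dict.keys, hit, List.map_map, Function.comp_def]
  have hcont : d.contains q = true := (PySem.Dict.contains_iff_mem_keys d q).mpr (hkeys ▸ hq)
  rw [PySem.Dict.items_insert_of_contains d _ hcont, hit, List.map_map]
  refine List.map_congr_left ?_
  intro p _
  by_cases hpq : p = q <;> simp [hpq]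

-- inserting a fresh key appends it
lemma pv_items_insert_new (Q : List String) (g : String → Int) (d : PySem.Dict String Int)
    (hit : d.items = Q.map (fun p => (p, g p))) {q : String} (hq : q ∉ Q) (w : Int) :
    (d.insert q w).items = Q.map (fun p => (p, g p)) ++ [(q, w)] := by
  have hkeys : d.keys = Q := by
    simp [PySem.Dict.keys, hit, List.map_map, Function.comp_def]
  have hcont : d.contains q = false := by
    by_contra h
    have : d.contains q = true := by
      cases hc : d.contains q with
      | true => rfl
      | false => exact absurd hc h
    exact hq (hkeys ▸ (PySem.Dict.contains_iff_mem_keys d q).mp this)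
  rw [PySem.Dict.items_insert_of_not_contains d _ hcont, hit]

-- getD of a key present in map-shaped items
lemma pv_getD_of_items (Q : List String) (g : String → Int) (d : PySem.Dict String Int)
    (hit : d.items = Q.map (fun p => (p, g p))) (hQ : Q.Nodup) {q : String} (hq : q ∈ Q) :
    d.getD q 0 = g q := by
  have hkeys : d.keys = Q := by
    simp [PySem.Dict.keys, hit, List.map_map, Function.comp_def]
  exact PySem.Dict.getD_of_mem_items d (by rw [hit]; exact List.mem_map_of_mem hq) (hkeys ▸ hQ) 0

-- getD of an absent key
lemma pv_getD_absent (Q : List String) (g : String → Int) (d : PySem.Dict String Int)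
    (hit : d.items = Q.map (fun p => (p, g p))) {q : String} (hq : q ∉ Q) :
    d.getD q 0 = 0 := by
  have hkeys : d.keys = Q := by
    simp [PySem.Dict.keys, hit, List.map_map, Function.comp_def]
  refine PySem.Dict.getD_of_not_contains d 0 ?_
  by_contra h
  have : d.contains q = true := by
    cases hc : d.contains q with
    | true => rfl
    | false => exact absurd hc h
  exact hq (hkeys ▸ (PySem.Dict.contains_iff_mem_keys d q).mp this)

-- modifying a present key rewrites exactly its value
lemma pv_items_modify (Q : List String) (g : String → Int) (d : PySem.Dict String Int)
    (hit : d.items = Q.map (fun p => (p, g p))) (hQ : Q.Nodup) {q : String} (hq : q ∈ Q)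
    (f : Int → Int) :
    (d.modify q 0 f).items = Q.map (fun p => (p, if p = q then f (g p) else g p)) := by
  show (d.insert q (f (d.getD q 0))).items = _
  rw [pv_getD_of_items Q g d hit hQ hq]
  rw [pv_items_insert_mem Q g d hit hq (f (g q))]
  refine List.map_congr_left ?_
  intro p _
  by_cases hpq : p = q <;> simp [hpq]

-- A's initial dict comprehension: the key list is the ordered dedup (a PySem.Set fold)
lemma pv_items_init (P : List String) :
    ∀ (Q : List String), Q.Nodup → ∀ (d : PySem.Dict String Int),
      d.items = Q.map (fun p => (p, (0 : Int))) →
      (P.foldl (fun d p => d.insert p 0) d).items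
        = (P.foldl (fun s p => PySem.Set.add s p) Q).map (fun p => (p, (0 : Int))) := by
  induction P with
  | nil => intro Q _ d hit; simpa using hit
  | cons q rest ih =>
    intro Q hQ d hit
    simp only [List.foldl_cons]
    by_cases hq : q ∈ Q
    · have h1 := pv_items_insert_mem Q (fun _ => 0) d hit hq 0
      have h1' : (d.insert q 0).items = Q.map (fun p => (p, (0 : Int))) := by
        rw [h1]; refine List.map_congr_left ?_; intro p _; by_cases hpq : p = q <;> simp [hpq]
      have hadd : PySem.Set.add Q q = Q := by
        simp [PySem.Set.add, hq]
      rw [hadd]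
      exact ih Q hQ _ h1'
    · have h1 := pv_items_insert_new Q (fun _ => 0) d hit hq 0
      have h1' : (d.insert q 0).items = (Q ++ [q]).map (fun p => (p, (0 : Int))) := by
        rw [h1]; simp
      have hadd : PySem.Set.add Q q = Q ++ [q] := by
        simp [PySem.Set.add, hq]
      rw [hadd]
      exact ih (Q ++ [q]) (by simp [List.nodup_append]; exact ⟨hQ, fun a ha h => hq (h ▸ ha)⟩) _ h1'

-- the inner `for player2 in players` loop adds c once per occurrence
lemma pv_items_inner (Q : List String) (hQ : Q.Nodup) (c : Int) :
    ∀ (L : List String), (∀ p ∈ L, p ∈ Q) →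
      ∀ (d : PySem.Dict String Int) (g : String → Int), d.items = Q.map (fun p => (p, g p)) →
      (L.foldl (fun d2 p2 => d2.modify p2 0 (fun v => v + c)) d).items
        = Q.map (fun p => (p, g p + c * (L.count p : Int))) := by
  intro L
  induction L with
  | nil =>
    intro _ d g hit
    simp only [List.foldl_nil, hit]
    refine List.map_congr_left ?_; intro p _; simp
  | cons q rest ih =>
    intro hL d g hit
    have hq : q ∈ Q := hL q (by simp)
    have h1 := pv_items_modify Q g d hit hQ hq (fun v => v + c)
    have h2 := ih (fun p hp => hL p (List.mem_cons_of_mem _ hp))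
      (d.modify q 0 (fun v => v + c)) (fun p => if p = q then g p + c else g p) h1
    simp only [List.foldl_cons, h2]
    refine List.map_congr_left ?_
    intro p _
    have hcount : (q :: rest).count p = rest.count p + (if q = p then 1 else 0) := by
      rw [List.count_cons]; simp
    rw [hcount]
    by_cases hpq : p = q
    · subst hpq; simp; ring
    · have : ¬ (q = p) := fun h => hpq h.symm
      simp [hpq, this]

-- A's outer loop over pairs (index, player): each step adds c_i to every occurrence
-- in `players` and subtracts n*c_i from the current player's entry
lemma pv_items_outer (Q : List String) (hQ : Q.Nodup) (P : List String)
    (hPQ : ∀ p ∈ P, p ∈ Q) (n : Int) (pts : List Int) :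
    ∀ (E : List (Int × String)), (∀ e ∈ E, e.2 ∈ Q) →
      ∀ (d : PySem.Dict String Int) (g : String → Int), d.items = Q.map (fun p => (p, g p)) →
      (E.foldl (fun d ip =>
          P.foldl (fun d2 p2 => d2.modify p2 0 (fun v => v + PySem.List.pyGetD pts ip.1 0))
            (d.modify ip.2 0 (fun v => v - n * PySem.List.pyGetD pts ip.1 0))) d).items
        = Q.map (fun p => (p,
            g p + (P.count p : Int) * (E.map (fun e => PySem.List.pyGetD pts e.1 0)).sum
              - n * ((E.filter (fun e => decide (e.2 = p))).map (fun e => PySem.List.pyGetD pts e.1 0)).sum)) := by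
  intro E
  induction E with
  | nil =>
    intro _ d g hit
    simp only [List.foldl_nil, hit]
    refine List.map_congr_left ?_; intro p _; simp
  | cons e rest ih =>
    intro hE d g hit
    have heQ : e.2 ∈ Q := hE e (by simp)
    have h1 := pv_items_modify Q g d hit hQ heQ
      (fun v => v - n * PySem.List.pyGetD pts e.1 0)
    have h2 := pv_items_inner Q hQ (PySem.List.pyGetD pts e.1 0) P hPQ _
      (fun p => if p = e.2 then g p - n * PySem.List.pyGetD pts e.1 0 else g p) h1
    have h3 := ih (fun e' he' => hE e' (List.mem_cons_of_mem _ he')) _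
      (fun p => (if p = e.2 then g p - n * PySem.List.pyGetD pts e.1 0 else g p)
        + PySem.List.pyGetD pts e.1 0 * (P.count p : Int)) h2
    simp only [List.foldl_cons]
    rw [h3]
    refine List.map_congr_left ?_
    intro p _
    by_cases hpe : p = e.2
    · subst hpe
      simp
      ring
    · have hne : ¬ (e.2 = p) := fun h => hpe h.symm
      simp [hne, hpe]
      ring

-- pyGetD over range 0..n reads off the first n elements
lemma pv_map_pyGetD_range (xs : List Int) (n : Nat) (h : n ≤ xs.length) :
    (PySem.List.pyRange 0 (n : Int)).map (fun j => PySem.List.pyGetD xs j 0) = xs.take n := by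
  have hlen : (xs.take n).length = n := by simpa using h
  have := PySem.List.map_pyGetD_pyRange_zero (xs.take n) 0
  rw [PySem.List.len_eq] at this
  rw [hlen] at this
  rw [← this]
  refine List.map_congr_left ?_
  intro j hj
  have hjr := PySem.List.mem_pyRange_one.mp hj
  obtain ⟨k, rfl⟩ : ∃ k : Nat, j = (k : Int) := ⟨j.toNat, (Int.toNat_of_nonneg hjr.1).symm⟩
  have hk : k < n := by exact_mod_cast hjr.2
  rw [PySem.List.pyGetD_natCast, PySem.List.pyGetD_natCast]
  simp [List.getD_eq_getElem?_getD, hk]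

-- enumerate-with-lookup is zip (within bounds)
lemma pv_enum_zip (pts : List Int) :
    ∀ (P : List String) (s : Nat), P.length + s ≤ pts.length →
      (PySem.List.enumerate P (s : Int)).map (fun ip => (ip.2, PySem.List.pyGetD pts ip.1 0))
        = P.zip (pts.drop s) := by
  intro P
  induction P with
  | nil => intro s _; simp
  | cons q rest ih =>
    intro s h
    have hs : s < pts.length := by simp at h; omega
    rw [PySem.List.enumerate_cons, List.drop_eq_getElem_cons hs]
    simp only [List.map_cons, List.zip_cons_cons]
    have hhead : PySem.List.pyGetD pts ((s : Nat) : Int) 0 = pts[s] := by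
      rw [PySem.List.pyGetD_natCast, List.getD_eq_getElem _ _ hs]
    have hcast : (s : Int) + 1 = ((s + 1 : Nat) : Int) := by push_cast; ring
    rw [hhead, hcast, ih (s + 1) (by simp at h ⊢; omega)]

-- summing total - n*pt over a list of pairs
lemma pv_sum_linear (total n : Int) :
    ∀ (W : List (String × Int)),
      (W.map (fun e => total - n * e.2)).sum
        = (W.length : Int) * total - n * (W.map (fun e => e.2)).sum := by
  intro W
  induction W with
  | nil => simp
  | cons w rest ih =>
    simp only [List.map_cons, List.sum_cons, ih, List.length_cons]
    push_cast
    ring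

-- occurrences of p among the firsts = length of the filter on firsts
lemma pv_count_filter (p : String) :
    ∀ (Z : List (String × Int)),
      (Z.map Prod.fst).count p = (Z.filter (fun e => decide (e.1 = p))).length := by
  intro Z
  induction Z with
  | nil => simp
  | cons z rest ih =>
    simp only [List.map_cons, List.count_cons, List.filter_cons, ih]
    by_cases h : z.1 = p
    · simp [h]
    · have : ¬ (z.1 == p) = true := by simpa using h
      simp [h, this]

-- B's one-pass fold: each pair (q, pt) adds total - n*pt to q's entry (0 if new)
lemma pv_items_foldB (total n : Int) :
    ∀ (Z : List (String × Int)) (Q : List String), Q.Nodup →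
      ∀ (d : PySem.Dict String Int) (g : String → Int), d.items = Q.map (fun p => (p, g p)) →
      (Z.foldl (fun d pp => d.insert pp.1 (d.getD pp.1 0 + total - n * pp.2)) d).items
        = (Z.foldl (fun s pp => PySem.Set.add s pp.1) Q).map
            (fun p => (p, (if p ∈ Q then g p else 0)
              + ((Z.filter (fun e => decide (e.1 = p))).map (fun e => total - n * e.2)).sum)) := by
  intro Z
  induction Z with
  | nil =>
    intro Q hQ d g hit
    simp only [List.foldl_nil, hit]
    refine List.map_congr_left ?_
    intro p hp
    simp [hp]
  | cons z rest ih =>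
    intro Q hQ d g hit
    simp only [List.foldl_cons]
    by_cases hz : z.1 ∈ Q
    · have hgd : d.getD z.1 0 = g z.1 := pv_getD_of_items Q g d hit hQ hz
      have h1 : (d.insert z.1 (d.getD z.1 0 + total - n * z.2)).items
          = Q.map (fun p => (p, if p = z.1 then g p + total - n * z.2 else g p)) := by
        rw [hgd, pv_items_insert_mem Q g d hit hz (g z.1 + total - n * z.2)]
        refine List.map_congr_left ?_
        intro p _
        by_cases hpz : p = z.1 <;> simp [hpz]
      have hadd : PySem.Set.add Q z.1 = Q := by simp [PySem.Set.add, hz]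
      rw [hadd]
      rw [ih Q hQ _ (fun p => if p = z.1 then g p + total - n * z.2 else g p) h1]
      refine List.map_congr_left ?_
      intro p hp
      simp only [List.filter_cons]
      by_cases hpz : p = z.1
      · subst hpz
        simp [hz]
        ring
      · have : ¬ (z.1 = p) := fun h => hpz h.symm
        simp [hpz, this]
    · have hgd : d.getD z.1 0 = 0 := pv_getD_absent Q g d hit hz
      have h1 : (d.insert z.1 (d.getD z.1 0 + total - n * z.2)).items
          = (Q ++ [z.1]).map (fun p => (p, if p = z.1 then total - n * z.2 else g p)) := by
        rw [hgd, pv_items_insert_new Q g d hit hz (0 + total - n * z.2)]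
        simp only [List.map_append, List.map_cons, List.map_nil]
        congr 1
        · refine List.map_congr_left ?_
          intro p hp
          have hpz : p ≠ z.1 := fun h => hz (h ▸ hp)
          simp [hpz]
        · simp
      have hadd : PySem.Set.add Q z.1 = Q ++ [z.1] := by simp [PySem.Set.add, hz]
      rw [hadd]
      rw [ih (Q ++ [z.1]) (by simp [List.nodup_append]; exact ⟨hQ, fun a ha h => hz (h ▸ ha)⟩) _
        (fun p => if p = z.1 then total - n * z.2 else g p) h1]
      refine List.map_congr_left ?_
      intro p hp
      simp only [List.filter_cons]
      by_cases hpz : p = z.1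
      · subst hpz
        simp [hz]
      · have hne : ¬ (z.1 = p) := fun h => hpz h.symm
        simp [hpz, hne, List.mem_append]

-- ===== VERDICT (by name: the statement is the Claim_ definition above) =====
theorem calcul_score_descendante_spec : Claim_equal_calcul_score_descendante := by
  intro dpl dpt _hdom hpre
  unfold Spec_calcul_score_descendante
  unfold Pre_calcul_score_descendante at hpre
  unfold calcul_score_descendante calcul_score_descendante_alt
  simp only at hpre ⊢
  generalize hPdef : ((PySem.Dict.ofList dpl).values).filter (fun p => !(p == "")) = P at hpre ⊢
  have hlen : P.length ≤ dpt.length := hpre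
  -- the shared ordered key set
  have hQnd : (P.foldl (fun s p => PySem.Set.add s p) ([] : List String)).Nodup :=
    PySem.Set.nodup_ofList P
  have hPQ : ∀ p ∈ P, p ∈ P.foldl (fun s p => PySem.Set.add s p) ([] : List String) := by
    intro p hp
    exact (PySem.Set.mem_ofList P p).mpr hp
  -- A's initial dict
  have h0 := pv_items_init P ([] : List String) (by simp)
    (PySem.Dict.empty : PySem.Dict String Int) (by simp [PySem.Dict.empty])
  -- A's outer loop
  have hE : ∀ e ∈ PySem.List.enumerate P 0, e.2 ∈ P.foldl (fun s p => PySem.Set.add s p) ([] : List String) := by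
    intro e he
    refine hPQ e.2 ?_
    have := List.mem_map_of_mem (f := fun x => x.2) he
    rwa [PySem.List.map_snd_enumerate] at this
  have hA := pv_items_outer _ hQnd P hPQ (P.length : Int) dpt (PySem.List.enumerate P 0) hE _ _ h0
  rw [hA]
  -- B's dict
  have hB := pv_items_foldB ((PySem.List.slice dpt none (some (P.length : Int))).sum)
      (P.length : Int) (P.zip dpt) ([] : List String) (by simp)
      (PySem.Dict.empty : PySem.Dict String Int) (fun _ => 0) (by simp [PySem.Dict.empty])
  rw [hB]
  -- B's key fold equals A's key fold
  have hfst : (P.zip dpt).map Prod.fst = P := List.map_fst_zip hlen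
  have hkeysB : (P.zip dpt).foldl (fun s pp => PySem.Set.add s pp.1) ([] : List String)
      = P.foldl (fun s p => PySem.Set.add s p) ([] : List String) := by
    rw [← List.foldl_map (f := Prod.fst) (g := fun s p => PySem.Set.add s p), hfst]
  rw [hkeysB]
  -- the enumerate pairs carry exactly the zipped points
  have hzip : (PySem.List.enumerate P (0 : Nat)).map (fun ip => (ip.2, PySem.List.pyGetD dpt ip.1 0))
      = P.zip dpt := by
    have := pv_enum_zip dpt P 0 (by omega)
    simpa using this
  -- the total sum
  have hS : ((PySem.List.enumerate P 0).map (fun e => PySem.List.pyGetD dpt e.1 0)).sum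
      = (PySem.List.slice dpt none (some (P.length : Int))).sum := by
    have h1 : (PySem.List.enumerate P 0).map (fun e => PySem.List.pyGetD dpt e.1 0)
        = ((PySem.List.enumerate P 0).map Prod.fst).map (fun j => PySem.List.pyGetD dpt j 0) := by
      rw [List.map_map]; rfl
    rw [h1, PySem.List.map_fst_enumerate]
    rw [PySem.List.slice_to_natCast]
    have : (0 : Int) + (P.length : Int) = (P.length : Int) := by ring
    rw [this, pv_map_pyGetD_range dpt P.length hlen]
  refine List.map_congr_left ?_
  intro p _
  refine Prod.ext rfl ?_
  show (0 : Int) + (P.count p : Int) * _ - _ = (if p ∈ ([] : List String) then (0:Int) else 0) + _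
  simp only [List.not_mem_nil, if_neg (fun h => h)]
  -- per-player filtered points agree between the enumerate and zip views
  have hfilter : ((P.zip dpt).filter (fun e => decide (e.1 = p)))
      = ((PySem.List.enumerate P 0).filter (fun e => decide (e.2 = p))).map
          (fun ip => (ip.2, PySem.List.pyGetD dpt ip.1 0)) := by
    rw [← hzip]
    rw [List.filter_map]
    rfl
  have hT : (((P.zip dpt).filter (fun e => decide (e.1 = p))).map (fun e => e.2)).sum
      = (((PySem.List.enumerate P 0).filter (fun e => decide (e.2 = p))).map
          (fun e => PySem.List.pyGetD dpt e.1 0)).sum := by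
    rw [hfilter, List.map_map]
    rfl
  have hcnt : (P.count p : Int) = (((P.zip dpt).filter (fun e => decide (e.1 = p))).length : Int) := by
    rw [← hfst, pv_count_filter p (P.zip dpt), hfst]
  rw [pv_sum_linear, ← hT, ← hcnt, ← hS]
  rw [hS]
  ring
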